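-- pv_equiv track=rewrite | github.com/CybercentreCanada/jupyterlab-sql-editor | jupyterlab_sql_editor/outputters/util.py | _dedup_names
-- ===== SOURCE A (Python) =====
-- import itertools
-- from typing import Any, Callable, List, Optional, Union, cast
--
-- def _dedup_names(names: List[str]) -> List[str]:
--     if len(set(names)) == len(names):
--         return names
--     else:
--
--         def _gen_dedup(_name: str) -> Callable[[], str]:
--             _i = itertools.count()
--             return lambda: f"{_name}_{next(_i)}"
--
--         def _gen_identity(_name: str) -> Callable[[], str]:
--             return lambda: _name
--
--         gen_new_name = {
--             name: _gen_dedup(name) if len(list(group)) > 1 else _gen_identity(name)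
--             for name, group in itertools.groupby(sorted(names))
--         }
--         return [gen_new_name[name]() for name in names]
-- ===== SOURCE B (Python) =====
-- def _dedup_names(names):
--     # one counting pass + one emission pass; no sort, no groupby, no closures, no all-unique fast path
--     total = {}
--     for n in names:
--         total[n] = total.get(n, 0) + 1
--     out = []
--     seen = {}
--     for n in names:
--         if total[n] > 1:
--             k = seen.get(n, 0)
--             out.append(f"{n}_{k}")
--             seen[n] = k + 1
--         else:
--             out.append(n)
--     return out
-- ===== Notes on version B (the rewrite author's own statement) =====
-- stated objective: alternative
-- what changed: Replaces A's set fast-path, sort+groupby and per-name closure table with one dict counting pass followed by one emission pass keeping a running per-name occurrence counter.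
import Mathlib
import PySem

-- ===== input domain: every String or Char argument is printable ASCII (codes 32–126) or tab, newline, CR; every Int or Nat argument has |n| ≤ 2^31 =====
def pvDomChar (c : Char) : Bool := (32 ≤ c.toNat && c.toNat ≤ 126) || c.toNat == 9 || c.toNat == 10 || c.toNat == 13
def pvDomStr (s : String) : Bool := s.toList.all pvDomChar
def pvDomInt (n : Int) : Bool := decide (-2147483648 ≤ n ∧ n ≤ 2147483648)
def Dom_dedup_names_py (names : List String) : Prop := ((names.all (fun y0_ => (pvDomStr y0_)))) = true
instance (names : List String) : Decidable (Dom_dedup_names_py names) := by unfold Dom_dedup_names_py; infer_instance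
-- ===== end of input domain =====

-- B replaces A's set fast-path, sort+groupby and per-name closure table by one dict counting
-- pass followed by one emission pass with running per-name counters.

-- ===== PORT A =====
-- itertools.groupby over the sorted list: run-length encoding of adjacent equal elements
def pvRunsAux (cur : String) (k : Nat) : List String → List (String × Nat)
  | [] => [(cur, k)]
  | y :: ys => if y = cur then pvRunsAux cur (k + 1) ys else (cur, k) :: pvRunsAux y 1 ys

def pvRuns : List String → List (String × Nat)
  | [] => []
  | x :: xs => pvRunsAux x 1 xs

def dedup_names_py (names : List String) : List String :=
  if PySem.Set.len (PySem.Set.ofList names) = (names.length : Int) then names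
  else
    -- gen_new_name: dict comprehension over itertools.groupby(sorted(names)); a _gen_dedup closure
    -- (itertools.count state) is modelled by carrying its counter explicitly in a Dict String Int
    -- during the final list comprehension, a _gen_identity closure by the dict value false.
    let gen : PySem.Dict String Bool :=
      (pvRuns (PySem.List.sorted names (fun x => x))).foldl
        (fun d p => d.insert p.1 (decide (1 < p.2))) PySem.Dict.empty
    (names.foldl
      (fun (acc : List String × PySem.Dict String Int) name =>
        if gen.getD name false then
          (acc.1 ++ [name ++ "_" ++ PySem.Int.toStr (acc.2.getD name 0)],
           acc.2.insert name (acc.2.getD name 0 + 1))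
        else (acc.1 ++ [name], acc.2))
      ([], PySem.Dict.empty)).1

-- ===== PORT B =====
def dedup_names_py_alt (names : List String) : List String :=
  let total : PySem.Dict String Int :=
    names.foldl (fun d n => d.insert n (d.getD n 0 + 1)) PySem.Dict.empty
  (names.foldl
    (fun (acc : List String × PySem.Dict String Int) n =>
      if 1 < total.getD n 0 then
        (acc.1 ++ [n ++ "_" ++ PySem.Int.toStr (acc.2.getD n 0)],
         acc.2.insert n (acc.2.getD n 0 + 1))
      else (acc.1 ++ [n], acc.2))
    ([], PySem.Dict.empty)).1

-- ===== PRECONDITION & SPEC =====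
def Spec_dedup_names_py (names : List String) (out : List String) : Prop := out = dedup_names_py_alt names
instance (names : List String) (out : List String) : Decidable (Spec_dedup_names_py names out) := by unfold Spec_dedup_names_py; infer_instance

-- ===== CLAIM (what is proved, stated in full; the proofs are below) =====
def Claim_equal_dedup_names_py : Prop := ∀ (names : List String), Dom_dedup_names_py names → Spec_dedup_names_py names (dedup_names_py names)

-- ===== LEMMAS AND PROOFS =====

-- common shape of both emission loops: emit each name, suffixed with its count in the
-- already-emitted prefix when P holds
def pvEmit (P : String → Prop) [DecidablePred P] (pre : List String) : List String → List String
  | [] => []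
  | n :: t => (if P n then n ++ "_" ++ PySem.Int.toStr ((pre.count n : Nat) : Int) else n) :: pvEmit P (pre ++ [n]) t

theorem pvEmit_congr (P Q : String → Prop) [DecidablePred P] [DecidablePred Q]
    (t : List String) (h : ∀ n ∈ t, P n ↔ Q n) :
    ∀ pre, pvEmit P pre t = pvEmit Q pre t := by
  induction t with
  | nil => intro pre; rfl
  | cons n t ih =>
    intro pre
    rw [pvEmit, pvEmit, if_congr (h n List.mem_cons_self) rfl rfl,
      ih (fun m hm => h m (List.mem_cons_of_mem _ hm))]

theorem pvEmit_of_false (P : String → Prop) [DecidablePred P]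
    (t : List String) (h : ∀ n ∈ t, ¬ P n) :
    ∀ pre, pvEmit P pre t = t := by
  induction t with
  | nil => intro pre; rfl
  | cons n t ih =>
    intro pre
    rw [pvEmit, if_neg (h n List.mem_cons_self),
      ih (fun m hm => h m (List.mem_cons_of_mem _ hm))]

-- set(names) keeps one copy of each distinct element, in particular it is a sublist of names
theorem pvFoldAdd (xs : List String) : ∀ s : List String, ∃ t, t.Sublist xs ∧ xs.foldl PySem.Set.add s = s ++ t := by
  induction xs with
  | nil => intro s; exact ⟨[], by simp⟩
  | cons x xs ih =>
    intro s
    simp only [List.foldl_cons]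
    by_cases hx : x ∈ s
    · obtain ⟨t, hs, he⟩ := ih (PySem.Set.add s x)
      rw [PySem.Set.add_of_mem hx] at he ⊢
      exact ⟨t, hs.cons _, he⟩
    · obtain ⟨t, hs, he⟩ := ih (PySem.Set.add s x)
      rw [PySem.Set.add_of_not_mem hx] at he ⊢
      exact ⟨x :: t, hs.cons₂ _, by simpa using he⟩

-- len(set(names)) == len(names) means names has no duplicates
theorem pvNodupOfLen (xs : List String) (h : (PySem.Set.ofList xs).length = xs.length) : xs.Nodup := by
  obtain ⟨t, hs, he⟩ := pvFoldAdd xs []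
  have hol : PySem.Set.ofList xs = t := by rw [PySem.Set.ofList_eq_foldl, he]; simp
  have ht : t = xs := hs.eq_of_length (by rw [← hol, h])
  have hnd := PySem.Set.nodup_ofList (xs := xs)
  rwa [hol, ht] at hnd

-- the dict built from the runs of a sorted list records, for each element, whether it repeats
theorem pvRunsFold :
    ∀ (l : List String) (cur : String) (k : Nat) (d : PySem.Dict String Bool),
    (cur :: l).Pairwise (· ≤ ·) →
    ∀ x, ((pvRunsAux cur k l).foldl (fun d p => d.insert p.1 (decide (1 < p.2))) d).getD x false =
      if x = cur then decide (1 < k + l.count cur)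
      else if x ∈ l then decide (1 < l.count x)
      else d.getD x false := by
  intro l
  induction l with
  | nil =>
    intro cur k d _ x
    simp [pvRunsAux, PySem.Dict.getD_insert]
  | cons y ys ih =>
    intro cur k d hp x
    by_cases hy : y = cur
    · subst hy
      rw [pvRunsAux, if_pos rfl]
      have hp' : (y :: ys).Pairwise (· ≤ ·) := hp.sublist (by simp)
      rw [ih y (k + 1) d hp' x]
      by_cases hx : x = y
      · subst hx
        simp [List.count_cons_self]
        omega
      · simp [hx, List.mem_cons, Ne.symm hx]
    · rw [pvRunsAux, if_neg hy, List.foldl_cons]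
      have hp' : (y :: ys).Pairwise (· ≤ ·) := hp.of_cons
      rw [ih y 1 _ hp' x]
      have hcy : cur ≤ y := (List.pairwise_cons.mp hp).1 y (by simp)
      have hys : ∀ z ∈ ys, y ≤ z := (List.pairwise_cons.mp hp').1
      by_cases hxc : x = cur
      · subst hxc
        have hxy : x ≠ y := fun h => hy (h.symm)
        have hxys : x ∉ ys := fun h => hy ((le_antisymm hcy (hys x h)).symm)
        simp [hxy, Ne.symm hxy, hxys, List.count_eq_zero.mpr hxys]
      · by_cases hxy : x = y
        · subst hxy
          simp [hxc, List.count_cons_self]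
        · by_cases hxys : x ∈ ys
          · simp [hxc, hxy, Ne.symm hxy, hxys]
          · simp [hxc, hxy, hxys, PySem.Dict.getD_insert]

-- each emission loop, with its per-name counters carried as a dict, is pvEmit
theorem pvEmitFold (P : String → Prop) [DecidablePred P] :
    ∀ (t : List String) (acc : List String) (d : PySem.Dict String Int) (pre : List String),
    (∀ m, P m → d.getD m 0 = ((pre.count m : Nat) : Int)) →
    (t.foldl
      (fun (acc : List String × PySem.Dict String Int) name =>
        if P name then
          (acc.1 ++ [name ++ "_" ++ PySem.Int.toStr (acc.2.getD name 0)],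
           acc.2.insert name (acc.2.getD name 0 + 1))
        else (acc.1 ++ [name], acc.2)) (acc, d)).1 = acc ++ pvEmit P pre t := by
  intro t
  induction t with
  | nil => intro acc d pre _; simp [pvEmit]
  | cons n t ih =>
    intro acc d pre h
    simp only [List.foldl_cons, pvEmit]
    by_cases hP : P n
    case pos =>
      rw [if_pos hP, if_pos hP, h n hP]
      rw [ih _ _ (pre ++ [n]) ?_]
      · simp
      · intro m hm
        rw [PySem.Dict.getD_insert]
        by_cases hmn : m = n
        · subst hmn; rw [if_pos rfl]; simp [List.count_append]
        · rw [if_neg hmn, h m hm]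
          simp [List.count_append, Ne.symm hmn]
    case neg =>
      rw [if_neg hP, if_neg hP]
      rw [ih _ _ (pre ++ [n]) ?_]
      · simp
      · intro m hm
        have hmn : m ≠ n := fun he => hP (he ▸ hm)
        rw [h m hm]
        simp [List.count_append, Ne.symm hmn]

-- ===== VERDICT (by name: the statement is the Claim_ definition above) =====
theorem dedup_names_py_spec : Claim_equal_dedup_names_py := by
  intro names _
  unfold Spec_dedup_names_py
  -- B: the counting dict holds exactly the multiplicities, so B's loop is pvEmit
  have hB : dedup_names_py_alt names
      = pvEmit (fun n =>
          (1 : Int) < (names.foldl (fun d n => d.insert n (d.getD n 0 + 1)) PySem.Dict.empty).getD n 0)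
          [] names := by
    simp only [dedup_names_py_alt]
    rw [pvEmitFold _ names [] PySem.Dict.empty []
      (by intro m _; simp [PySem.Dict.getD_empty])]
    rw [List.nil_append]
  have hTot : ∀ n, (names.foldl (fun d n => d.insert n (d.getD n 0 + 1)) PySem.Dict.empty).getD n 0
      = ((names.count n : Nat) : Int) := by
    intro n
    rw [PySem.Dict.getD_foldl_insert_add_one, PySem.Dict.getD_empty, zero_add]
  by_cases hlen : PySem.Set.len (PySem.Set.ofList names) = (names.length : Int)
  · -- all distinct: A returns names unchanged; every B suffix test is false
    have hnd : names.Nodup := by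
      apply pvNodupOfLen
      have : ((PySem.Set.ofList names).length : Int) = (names.length : Int) := by
        simpa [PySem.Set.len] using hlen
      exact_mod_cast this
    rw [hB, pvEmit_of_false]
    · unfold dedup_names_py
      rw [if_pos hlen]
    · intro n hn
      rw [hTot n, List.count_eq_one_of_mem hnd hn]
      omega
  · simp only [dedup_names_py, if_neg hlen]
    set G : PySem.Dict String Bool :=
      (pvRuns (PySem.List.sorted names (fun x => x))).foldl
        (fun d p => d.insert p.1 (decide (1 < p.2))) PySem.Dict.empty with hG
    have hgen : ∀ x ∈ names, G.getD x false = decide (1 < names.count x) := by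
      intro x hx
      have hperm := PySem.List.sorted_perm names (fun y => y) false
      have hpw := PySem.List.sorted_pairwise names (fun y => y)
      cases hs : PySem.List.sorted names (fun y => y) false with
      | nil =>
        exfalso
        rw [hs] at hperm
        rw [hperm.symm.eq_nil] at hx
        exact (List.not_mem_nil hx)
      | cons c l =>
        have hcount : (c :: l).count x = names.count x := by
          rw [← hs]; exact hperm.count_eq x
        rw [hG]
        rw [show PySem.List.sorted names (fun x => x) = c :: l from hs]
        rw [show pvRuns (c :: l) = pvRunsAux c 1 l from rfl]
        rw [pvRunsFold l c 1 PySem.Dict.empty (by rw [← hs]; exact hpw) x]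
        by_cases hxc : x = c
        · subst hxc
          rw [if_pos rfl, decide_eq_decide]
          rw [← hcount, List.count_cons_self]
          omega
        · have hxl : x ∈ l := by
            have : x ∈ c :: l := by rw [← hs]; exact (hperm.mem_iff).mpr hx
            exact (List.mem_cons.mp this).resolve_left hxc
          rw [if_neg hxc, if_pos hxl, decide_eq_decide, ← hcount]
          simp [Ne.symm hxc]
    rw [pvEmitFold (fun name => G.getD name false = true) names [] PySem.Dict.empty []
      (by intro m _; simp [PySem.Dict.getD_empty])]
    rw [hB, List.nil_append]
    apply pvEmit_congr
    intro n hn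
    rw [hgen n hn, hTot n]
    have hpos : 0 < names.count n := List.count_pos_iff.mpr hn
    simp only [decide_eq_true_eq]
    omega
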